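-- pv_equiv track=rewrite | github.com/bhavikaG21/ga-learner-dsmp-repo | EMMY-Winner-Analysis/code.py | vocab_creator
-- ===== SOURCE A (Python) =====
-- def vocab_creator(tagged_titles):
--     vocab = {}
--
--     for row in tagged_titles['nominee']:
--         for word, tag in row:
--             if word in vocab:
--                 if tag in vocab[word]:
--                     vocab[word][tag] += 1
--                 else:
--                     vocab[word][tag] = 1
--             else:
--                 vocab[word] = {tag: 1}
--
--     return vocab
-- ===== SOURCE B (Python) =====
-- def vocab_creator(tagged_titles):
--     # Two-phase: group each word's tags into a list, then count tags per word.
--     grouped = {}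
--     for row in tagged_titles['nominee']:
--         for word, tag in row:
--             grouped.setdefault(word, []).append(tag)
--     vocab = {}
--     for word, tags in grouped.items():
--         counts = {}
--         for t in tags:
--             counts[t] = counts.get(t, 0) + 1
--         vocab[word] = counts
--     return vocab
-- ===== Notes on version B (the rewrite author's own statement) =====
-- stated objective: alternative
-- what changed: Replaces the inline nested membership checks with a two-phase group-then-count structure: first gather each word's tag list via setdefault/append, then build each word's tag-count dict in a second pass.
import Mathlib
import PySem

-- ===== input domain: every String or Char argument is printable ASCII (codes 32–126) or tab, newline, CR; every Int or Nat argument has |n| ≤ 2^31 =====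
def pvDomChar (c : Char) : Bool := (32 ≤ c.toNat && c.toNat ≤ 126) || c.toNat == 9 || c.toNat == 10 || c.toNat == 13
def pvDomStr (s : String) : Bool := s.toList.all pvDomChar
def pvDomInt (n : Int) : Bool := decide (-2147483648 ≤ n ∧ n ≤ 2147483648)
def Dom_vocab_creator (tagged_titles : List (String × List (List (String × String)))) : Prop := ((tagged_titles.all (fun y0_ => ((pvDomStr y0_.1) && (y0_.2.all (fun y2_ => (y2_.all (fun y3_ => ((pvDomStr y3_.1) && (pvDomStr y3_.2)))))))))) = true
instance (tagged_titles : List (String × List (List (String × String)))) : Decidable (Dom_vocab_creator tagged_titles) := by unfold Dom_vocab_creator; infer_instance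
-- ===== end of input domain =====

-- B replaces A's inline nested membership checks by a two-phase group-then-count structure
-- (gather each word's tag list, then count tags per word); alternative decomposition, same cost.
-- A mutates nothing observable; equivalence is about the return value.

-- ===== PORT A =====
-- one iteration of A's inner loop body (the word/tag token step)
def vcStepA (vocab : PySem.Dict String (PySem.Dict String Int)) (wt : String × String) :
    PySem.Dict String (PySem.Dict String Int) :=
  match vocab.get? wt.1 with
  | some inner =>
      if inner.contains wt.2 then
        vocab.insert wt.1 (inner.insert wt.2 (inner.getD wt.2 0 + 1))
      else
        vocab.insert wt.1 (inner.insert wt.2 1)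
  | none => vocab.insert wt.1 (PySem.Dict.mk [(wt.2, 1)])

def vocab_creator (tagged_titles : List (String × List (List (String × String)))) : List (String × List (String × Int)) :=
  match (PySem.Dict.mk tagged_titles).get? "nominee" with
  | none => []   -- tagged_titles['nominee'] raises KeyError here; excluded by Pre_
  | some rows =>
      let vocab := rows.foldl (fun v row => row.foldl vcStepA v) PySem.Dict.empty
      vocab.items.map (fun p => (p.1, p.2.items))

-- ===== PORT B =====
def vocab_creator_alt (tagged_titles : List (String × List (List (String × String)))) : List (String × List (String × Int)) :=
  match (PySem.Dict.mk tagged_titles).get? "nominee" with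
  | none => []   -- tagged_titles['nominee'] raises KeyError here; excluded by Pre_
  | some rows =>
      let grouped := rows.foldl
        (fun d row => row.foldl (fun d wt => d.modify wt.1 [] (fun l => l ++ [wt.2])) d)
        PySem.Dict.empty
      let vocab := grouped.items.foldl
        (fun v p => v.insert p.1 (p.2.foldl (fun c t => c.insert t (c.getD t 0 + 1)) PySem.Dict.empty))
        PySem.Dict.empty
      vocab.items.map (fun p => (p.1, p.2.items))

-- ===== PRECONDITION & SPEC =====
-- Pre_ excludes exactly the inputs without a 'nominee' key, on which A raises KeyError.
def Pre_vocab_creator (tagged_titles : List (String × List (List (String × String)))) : Prop :=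
  (PySem.Dict.mk tagged_titles).contains "nominee" = true
instance (tagged_titles : List (String × List (List (String × String)))) : Decidable (Pre_vocab_creator tagged_titles) := by unfold Pre_vocab_creator; infer_instance

def pvWitness_vocab_creator : (List (String × List (List (String × String)))) :=
  [("nominee", [[("emmy", "NN"), ("award", "NN")], [("emmy", "JJ")]])]

def Spec_vocab_creator (tagged_titles : List (String × List (List (String × String)))) (out : List (String × List (String × Int))) : Prop := out = vocab_creator_alt tagged_titles
instance (tagged_titles : List (String × List (List (String × String)))) (out : List (String × List (String × Int))) : Decidable (Spec_vocab_creator tagged_titles out) := by unfold Spec_vocab_creator; infer_instance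

-- ===== CLAIM (what is proved, stated in full; the proofs are below) =====
def Claim_equal_vocab_creator : Prop := ∀ (tagged_titles : List (String × List (List (String × String)))), Dom_vocab_creator tagged_titles → Pre_vocab_creator tagged_titles → Spec_vocab_creator tagged_titles (vocab_creator tagged_titles)

-- ===== LEMMAS AND PROOFS =====

-- tags attached to word w, in order
def vcTags (ps : List (String × String)) (w : String) : List String :=
  (ps.filter (fun wt => wt.1 == w)).map (fun wt => wt.2)

-- the tag-count dict of word w (closed form)
def vcInner (ps : List (String × String)) (w : String) : PySem.Dict String Int :=
  PySem.Dict.mk ((PySem.Set.ofList (vcTags ps w)).map (fun t => (t, ((vcTags ps w).count t : Int))))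

-- closed form of the whole vocab dict
def vcCF (ps : List (String × String)) : PySem.Dict String (PySem.Dict String Int) :=
  PySem.Dict.mk ((PySem.Set.ofList (ps.map (fun wt => wt.1))).map (fun w => (w, vcInner ps w)))

theorem get?_mk_map {α ν : Type} [BEq α] [LawfulBEq α] (l : List α) (F : α → ν) (x : α) :
    (PySem.Dict.mk (l.map (fun a => (a, F a)))).get? x = if x ∈ l then some (F x) else none := by
  induction l with
  | nil => simp [PySem.Dict.get?]
  | cons a l ih =>
    simp only [List.map_cons, PySem.Dict.get?_mk_cons, ih, List.mem_cons]
    by_cases h : a = x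
    · subst h; simp
    · have : (a == x) = false := by simp [h]
      simp [this, Ne.symm h]

theorem contains_mk_map {α ν : Type} [BEq α] [LawfulBEq α] [DecidableEq α] (l : List α) (F : α → ν) (x : α) :
    (PySem.Dict.mk (l.map (fun a => (a, F a)))).contains x = decide (x ∈ l) := by
  rw [PySem.Dict.contains_eq_decide_mem_keys]
  congr 1
  simp [PySem.Dict.keys]

theorem getD_mk_map {α ν : Type} [BEq α] [LawfulBEq α] (l : List α) (F : α → ν) (x : α) (d0 : ν) :
    (PySem.Dict.mk (l.map (fun a => (a, F a)))).getD x d0 = if x ∈ l then F x else d0 := by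
  rw [PySem.Dict.getD_eq_get?_getD, get?_mk_map]
  split <;> rfl

theorem vcTags_append_ne (ps : List (String × String)) (w t x : String) (h : x ≠ w) :
    vcTags (ps ++ [(w, t)]) x = vcTags ps x := by
  simp [vcTags, List.filter_append, Ne.symm h]

theorem vcTags_append_self (ps : List (String × String)) (w t : String) :
    vcTags (ps ++ [(w, t)]) w = vcTags ps w ++ [t] := by
  simp [vcTags, List.filter_append]

theorem vcInner_append_ne (ps : List (String × String)) (w t x : String) (h : x ≠ w) :
    vcInner (ps ++ [(w, t)]) x = vcInner ps x := by
  simp [vcInner, vcTags_append_ne ps w t x h]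

theorem vcStepA_CF (ps : List (String × String)) (w t : String) :
    vcStepA (vcCF ps) (w, t) = vcCF (ps ++ [(w, t)]) := by
  have hmapfst : (ps ++ [(w, t)]).map (fun wt => wt.1) = ps.map (fun wt => wt.1) ++ [w] := by simp
  by_cases hw : w ∈ ps.map (fun wt => wt.1)
  · -- word already present
    have hget : (vcCF ps).get? w = some (vcInner ps w) := by
      rw [vcCF, get?_mk_map]
      simp [PySem.Set.mem_ofList, hw]
    have hS : PySem.Set.ofList ((ps ++ [(w, t)]).map (fun wt => wt.1)) = PySem.Set.ofList (ps.map (fun wt => wt.1)) := by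
      rw [hmapfst, PySem.Set.ofList_append_singleton, PySem.Set.add_of_mem]
      rw [PySem.Set.mem_ofList]; exact hw
    have hcontW : (vcCF ps).contains w = true := by
      rw [vcCF, contains_mk_map]
      simp [PySem.Set.mem_ofList, hw]
    have houter : ∀ inner', vcInner (ps ++ [(w, t)]) w = inner' →
        (vcCF ps).insert w inner' = vcCF (ps ++ [(w, t)]) := by
      intro inner' hinner'
      apply PySem.Dict.ext
      rw [PySem.Dict.items_insert_of_contains _ _ hcontW]
      simp only [vcCF]
      rw [hS, List.map_map]
      apply List.map_congr_left
      intro x hx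
      by_cases hxw : x = w
      · subst hxw; simp [hinner']
      · have : (x == w) = false := by simp [hxw]
        simp [Function.comp, this, vcInner_append_ne ps w t x hxw]
    show vcStepA (vcCF ps) (w, t) = _
    rw [vcStepA]
    simp only [hget]
    by_cases ht : t ∈ vcTags ps w
    · have hcontT : (vcInner ps w).contains t = true := by
        rw [vcInner, contains_mk_map]; simp [PySem.Set.mem_ofList, ht]
      have hgetD : (vcInner ps w).getD t 0 = ((vcTags ps w).count t : Int) := by
        rw [vcInner, getD_mk_map]; simp [PySem.Set.mem_ofList, ht]
      simp only [hcontT, if_true, hgetD]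
      apply houter
      -- inner equality: replace t's count by count+1
      apply Eq.symm
      apply PySem.Dict.ext
      rw [PySem.Dict.items_insert_of_contains _ _ hcontT]
      simp only [vcInner]
      rw [vcTags_append_self]
      have hT : PySem.Set.ofList (vcTags ps w ++ [t]) = PySem.Set.ofList (vcTags ps w) := by
        rw [PySem.Set.ofList_append_singleton, PySem.Set.add_of_mem]
        rw [PySem.Set.mem_ofList]; exact ht
      rw [hT, List.map_map]
      apply List.map_congr_left
      intro x hx
      by_cases hxt : x = t
      · subst hxt
        simp [Function.comp, List.count_append]
      · have : (x == t) = false := by simp [hxt]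
        have hc : (vcTags ps w ++ [t]).count x = (vcTags ps w).count x := by
          rw [List.count_append]
          simp [Ne.symm hxt]
        simp [Function.comp, this, hc]
    · have hcontT : (vcInner ps w).contains t = false := by
        rw [vcInner, contains_mk_map]; simp [PySem.Set.mem_ofList, ht]
      simp only [hcontT, if_false, Bool.false_eq_true]
      apply houter
      apply Eq.symm
      apply PySem.Dict.ext
      rw [PySem.Dict.items_insert_of_not_contains _ _ hcontT]
      simp only [vcInner]
      rw [vcTags_append_self]
      have hT : PySem.Set.ofList (vcTags ps w ++ [t]) = PySem.Set.ofList (vcTags ps w) ++ [t] := by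
        rw [PySem.Set.ofList_append_singleton, PySem.Set.add_of_not_mem]
        rw [PySem.Set.mem_ofList]; exact ht
      rw [hT, List.map_append]
      congr 1
      · apply List.map_congr_left
        intro x hx
        have hxmem : x ∈ vcTags ps w := by
          rw [← PySem.Set.mem_ofList]; exact hx
        have hxt : x ≠ t := fun h => ht (h ▸ hxmem)
        have hc : (vcTags ps w ++ [t]).count x = (vcTags ps w).count x := by
          rw [List.count_append]
          simp [Ne.symm hxt]
        simp [hc]
      · have h0 : (vcTags ps w).count t = 0 := List.count_eq_zero.mpr ht
        simp [List.count_append, h0]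
  · -- new word
    have hget : (vcCF ps).get? w = none := by
      rw [vcCF, get?_mk_map]
      simp [PySem.Set.mem_ofList, hw]
    have hcontW : (vcCF ps).contains w = false := by
      rw [vcCF, contains_mk_map]
      simp [PySem.Set.mem_ofList, hw]
    show vcStepA (vcCF ps) (w, t) = _
    rw [vcStepA]
    simp only [hget]
    apply PySem.Dict.ext
    rw [PySem.Dict.items_insert_of_not_contains _ _ hcontW]
    simp only [vcCF]
    have hS : PySem.Set.ofList ((ps ++ [(w, t)]).map (fun wt => wt.1)) = PySem.Set.ofList (ps.map (fun wt => wt.1)) ++ [w] := by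
      rw [hmapfst, PySem.Set.ofList_append_singleton, PySem.Set.add_of_not_mem]
      rw [PySem.Set.mem_ofList]; exact hw
    rw [hS, List.map_append]
    congr 1
    · apply List.map_congr_left
      intro x hx
      have hxmem : x ∈ ps.map (fun wt => wt.1) := by
        rw [← PySem.Set.mem_ofList]; exact hx
      have hxw : x ≠ w := fun h => hw (h ▸ hxmem)
      simp [vcInner_append_ne ps w t x hxw]
    · have hTags0 : vcTags ps w = [] := by
        rw [vcTags]
        have : ps.filter (fun wt => wt.1 == w) = [] := by
          rw [List.filter_eq_nil_iff]
          intro wt hwt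
          simp only [beq_iff_eq]
          intro h
          exact hw (h ▸ List.mem_map_of_mem hwt)
        rw [this]; rfl
      simp [vcInner, vcTags_append_self, hTags0, PySem.Set.ofList]

theorem vcA_char (ps : List (String × String)) :
    ps.foldl vcStepA PySem.Dict.empty = vcCF ps := by
  induction ps using List.reverseRecOn with
  | nil => rfl
  | append_singleton ps wt ih =>
    rw [List.foldl_append, List.foldl_cons, List.foldl_nil, ih]
    exact vcStepA_CF ps wt.1 wt.2

-- B's grouped dict, flattened form
theorem vcB_char (ps : List (String × String)) :
    (((ps.foldl (fun d wt => d.modify wt.1 [] (fun l => l ++ [wt.2])) PySem.Dict.empty).items.foldl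
        (fun v p => v.insert p.1 (p.2.foldl (fun c t => c.insert t (c.getD t 0 + 1)) PySem.Dict.empty))
        PySem.Dict.empty).items.map (fun p => (p.1, p.2.items)))
      = (vcCF ps).items.map (fun p => (p.1, p.2.items)) := by
  set grouped := ps.foldl (fun d wt => d.modify wt.1 [] (fun l => l ++ [wt.2])) PySem.Dict.empty with hgdef
  have hkeys : grouped.keys = PySem.Set.ofList (ps.map (fun wt => wt.1)) := by
    rw [hgdef]
    rw [PySem.Dict.keys_foldl_modify_key ps (fun wt => wt.1) [] (fun _ wt l => l ++ [wt.2]) PySem.Dict.empty]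
    simp [PySem.Dict.keys_empty, PySem.Set.update_nil_left]
  have hnodup : grouped.keys.Nodup := by
    rw [hkeys]; exact PySem.Set.nodup_ofList _
  have hgetD : ∀ w, grouped.getD w [] = vcTags ps w := by
    intro w
    rw [hgdef, PySem.Dict.getD_foldl_modify_append]
    simp [PySem.Dict.getD_empty, vcTags]
  have hitems : grouped.items = (PySem.Set.ofList (ps.map (fun wt => wt.1))).map (fun w => (w, vcTags ps w)) := by
    rw [PySem.Dict.items_eq_map_keys grouped hnodup []]
    rw [hkeys]
    exact List.map_congr_left (fun w _ => by rw [hgetD w])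
  have hfresh : ∀ p ∈ grouped.items, (PySem.Dict.empty : PySem.Dict String (PySem.Dict String Int)).contains p.1 = false := by
    intro p _; exact PySem.Dict.contains_empty _
  have hmapnodup : (grouped.items.map (fun p => p.1)).Nodup := hnodup
  have hvitems : ((grouped.items.foldl
        (fun v p => v.insert p.1 (p.2.foldl (fun c t => c.insert t (c.getD t 0 + 1)) PySem.Dict.empty))
        (PySem.Dict.empty : PySem.Dict String (PySem.Dict String Int)))).items
      = grouped.items.map (fun p => (p.1, p.2.foldl (fun c t => c.insert t (c.getD t 0 + 1)) (PySem.Dict.empty : PySem.Dict String Int))) := by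
    have h := PySem.Dict.items_foldl_insert_fresh grouped.items (fun p => p.1)
        (fun p => p.2.foldl (fun c t => c.insert t (c.getD t 0 + 1)) PySem.Dict.empty)
        PySem.Dict.empty hfresh hmapnodup
    simpa using h
  rw [hvitems, hitems, List.map_map, List.map_map]
  simp only [vcCF]
  show _ = List.map _ (List.map _ _)
  rw [List.map_map]
  apply List.map_congr_left
  intro w _
  simp only [Function.comp]
  congr 1
  rw [PySem.Dict.foldl_insert_getD_add_one_eq_counter, PySem.Dict.items_counter]
  rfl

theorem vc_main (rows : List (List (String × String))) :
    ((rows.foldl (fun v row => row.foldl vcStepA v) PySem.Dict.empty).items.map (fun p => (p.1, p.2.items)))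
      = (((rows.foldl (fun d row => row.foldl (fun d wt => d.modify wt.1 [] (fun l => l ++ [wt.2])) d) PySem.Dict.empty).items.foldl
          (fun v p => v.insert p.1 (p.2.foldl (fun c t => c.insert t (c.getD t 0 + 1)) PySem.Dict.empty))
          PySem.Dict.empty).items.map (fun p => (p.1, p.2.items))) := by
  rw [← List.foldl_flatten, ← List.foldl_flatten, vcA_char, vcB_char]

-- ===== VERDICT (by name: the statement is the Claim_ definition above) =====
theorem vocab_creator_spec : Claim_equal_vocab_creator := by
  intro tt _ hpre
  unfold Spec_vocab_creator vocab_creator vocab_creator_alt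
  have hsome : ((PySem.Dict.mk tt).get? "nominee").isSome := by
    rw [← PySem.Dict.contains_eq_isSome_get?]; exact hpre
  obtain ⟨rows, hrows⟩ := Option.isSome_iff_exists.mp hsome
  rw [hrows]
  exact vc_main rows
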